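-- pv_equiv track=rewrite | github.com/eliottcassidy2000/math | 04-computation/key_identity_r_half_verification.py | tiling_to_tournament
-- ===== SOURCE A (Python) =====
-- def tiling_to_tournament(bits, n):
--     A = [[0]*n for _ in range(n)]
--     for i in range(1, n):
--         A[i][i-1] = 1
--     tiles = [(a,b) for a in range(n) for b in range(a) if a-b >= 2]
--     tiles.sort()
--     for idx, (a, b) in enumerate(tiles):
--         if (bits >> idx) & 1:
--             A[b][a] = 1
--         else:
--             A[a][b] = 1
--     return A
-- ===== SOURCE B (Python) =====
-- def tiling_to_tournament(bits, n):
--     # Build the matrix directly, computing each cell from (i, j, bits) in closed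
--     # form instead of writing 1s into a mutable zero matrix.
--     def cell(i, j):
--         if i == j:
--             return 0
--         if i > j:
--             if i - j == 1:
--                 return 1
--             idx = (i - 1) * (i - 2) // 2 + j
--             return 0 if (bits >> idx) & 1 else 1
--         else:
--             if j - i == 1:
--                 return 0
--             idx = (j - 1) * (j - 2) // 2 + i
--             return 1 if (bits >> idx) & 1 else 0
--     return [[cell(i, j) for j in range(n)] for i in range(n)]
-- ===== Notes on version B (the rewrite author's own statement) =====
-- stated objective: alternative
-- what changed: B has no mutable matrix and no write loops at all: it computes every entry A[i][j] directly by a closed-form per-cell function of (i, j, bits) (the bit index of a far pair being (max-1)*(max-2)//2 + min) and builds the matrix with a nested comprehension, replacing A's zero-matrix-plus-sequence-of-writes over a built-and-sorted tiles table.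
import Mathlib
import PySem

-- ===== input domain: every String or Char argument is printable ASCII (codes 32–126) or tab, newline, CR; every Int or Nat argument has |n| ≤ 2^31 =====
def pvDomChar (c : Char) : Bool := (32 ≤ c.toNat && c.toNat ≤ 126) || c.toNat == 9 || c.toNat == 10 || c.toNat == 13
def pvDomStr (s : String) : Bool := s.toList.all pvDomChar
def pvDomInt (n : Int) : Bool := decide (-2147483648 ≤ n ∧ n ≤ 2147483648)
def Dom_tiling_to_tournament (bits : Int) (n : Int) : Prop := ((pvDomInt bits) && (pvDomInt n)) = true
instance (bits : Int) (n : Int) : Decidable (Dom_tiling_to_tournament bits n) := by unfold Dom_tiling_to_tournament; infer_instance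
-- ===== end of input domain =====

-- B replaces A's mutable zero matrix, tile-table build+sort and write loops by a pure per-cell
-- closed-form function of (i, j, bits), building every row directly; same return value.

-- ===== PORT A =====
-- [[0]*n for _ in range(n)]  ([0]*n is [] for n ≤ 0, hence n.toNat — exact)
def pvAInit (n : Int) : List (List Int) :=
  (PySem.List.pyRange 0 n 1).map (fun _ => List.replicate n.toNat (0 : Int))

-- for i in range(1, n): A[i][i-1] = 1   (indices are in range, so List.modify/List.set are exact)
def pvASub (n : Int) (A : List (List Int)) : List (List Int) :=
  (PySem.List.pyRange 1 n 1).foldl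
    (fun A i => A.modify i.toNat (fun row => row.set (i - 1).toNat 1)) A

-- tiles = [(a,b) for a in range(n) for b in range(a) if a-b >= 2]
def pvATiles (n : Int) : List (Int × Int) :=
  (PySem.List.pyRange 0 n 1).flatMap
    (fun a => (PySem.List.pyRange 0 a 1).filterMap
      (fun b => if 2 ≤ a - b then some (a, b) else none))

-- loop body: if (bits >> idx) & 1: A[b][a] = 1 else: A[a][b] = 1
-- (Python >> on Int is Lean's >>> per PySem; x & 1 is x % 2 with floor sign, i.e. PySem.Int.mod x 2 — exact)
def pvAStep (bits : Int) (A : List (List Int)) (p : Int × (Int × Int)) : List (List Int) :=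
  if PySem.Int.mod (bits >>> p.1.toNat) 2 ≠ 0 then
    A.modify p.2.2.toNat (fun row => row.set p.2.1.toNat 1)
  else
    A.modify p.2.1.toNat (fun row => row.set p.2.2.toNat 1)

def tiling_to_tournament (bits : Int) (n : Int) : List (List Int) :=
  (PySem.List.enumerate (PySem.List.sorted2 (pvATiles n) Prod.fst Prod.snd)).foldl
    (pvAStep bits) (pvASub n (pvAInit n))

-- ===== PORT B =====
-- the per-cell helper 'cell(i, j)' of Source B (i, j are nonnegative row/column indices, so the
-- shift amount (…).toNat is exact; '& 1' as floor-mod 2, '//' as PySem floordiv)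
def pvCell (bits : Int) (i : Int) (j : Int) : Int :=
  if i = j then 0
  else if j < i then
    if i - j = 1 then 1
    else if PySem.Int.mod (bits >>> (PySem.Int.floordiv ((i - 1) * (i - 2)) 2 + j).toNat) 2 ≠ 0
      then 0 else 1
  else
    if j - i = 1 then 0
    else if PySem.Int.mod (bits >>> (PySem.Int.floordiv ((j - 1) * (j - 2)) 2 + i).toNat) 2 ≠ 0
      then 1 else 0

-- [[cell(i, j) for j in range(n)] for i in range(n)]
def tiling_to_tournament_alt (bits : Int) (n : Int) : List (List Int) :=
  (PySem.List.pyRange 0 n 1).map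
    (fun i => (PySem.List.pyRange 0 n 1).map (fun j => pvCell bits i j))

-- ===== PRECONDITION & SPEC =====
def Spec_tiling_to_tournament (bits : Int) (n : Int) (out : List (List Int)) : Prop := out = tiling_to_tournament_alt bits n
instance (bits : Int) (n : Int) (out : List (List Int)) : Decidable (Spec_tiling_to_tournament bits n out) := by unfold Spec_tiling_to_tournament; infer_instance

-- ===== CLAIM (what is proved, stated in full; the proofs are below) =====
def Claim_equal_tiling_to_tournament : Prop := ∀ (bits : Int) (n : Int), Dom_tiling_to_tournament bits n → Spec_tiling_to_tournament bits n (tiling_to_tournament bits n)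

-- ===== LEMMAS AND PROOFS =====

-- ---- proof-only helpers: A's tiles loop as a double loop with a closed-form bit offset ----
def pvBStep (bits base a : Int) (A : List (List Int)) (b : Int) : List (List Int) :=
  if PySem.Int.mod (bits >>> (base + b).toNat) 2 ≠ 0 then
    A.modify b.toNat (fun row => row.set a.toNat 1)
  else
    A.modify a.toNat (fun row => row.set b.toNat 1)

def pvBOuter (bits : Int) (A : List (List Int)) (a : Int) : List (List Int) :=
  let base := PySem.Int.floordiv ((a - 1) * (a - 2)) 2
  (PySem.List.pyRange 0 (a - 1) 1).foldl (pvBStep bits base a) A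

-- the tiles list in the a-grouped form
def pvTilesL (n : Int) : List (Int × Int) :=
  (PySem.List.pyRange 2 n 1).flatMap
    (fun a => (PySem.List.pyRange 0 (a - 1) 1).map (fun b => (a, b)))

-- insertion sort of a strictly increasing list is the identity
theorem pv_foldl_insertBy_self {α : Type} (before : α → α → Bool) :
    ∀ (xs acc : List α), xs.Pairwise (fun x y => before y x = false) →
      (∀ x ∈ xs, ∀ y ∈ acc, before x y = false) →
      xs.foldl (fun acc x => PySem.List.insertBy before x acc) acc = acc ++ xs := by
  intro xs
  induction xs with
  | nil => intro acc _ _; simp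
  | cons x xs ih =>
    intro acc hp hacc
    rw [List.pairwise_cons] at hp
    have h1 : PySem.List.insertBy before x acc = acc ++ [x] :=
      PySem.List.insertBy_of_forall_not_before before x acc
        (fun y hy => hacc x (List.mem_cons_self) y hy)
    simp only [List.foldl_cons, h1]
    rw [ih (acc ++ [x]) hp.2]
    · simp
    · intro z hz y hy
      rcases List.mem_append.1 hy with h | h
      · exact hacc z (List.mem_cons_of_mem _ hz) y h
      · simp at h; subst h; exact hp.1 z hz

theorem pv_inner_eq (a : Int) (ha : 2 ≤ a) :
    (PySem.List.pyRange 0 a 1).filterMap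
      (fun b => if 2 ≤ a - b then some (a, b) else none)
    = (PySem.List.pyRange 0 (a - 1) 1).map (fun b => (a, b)) := by
  have hsplit := PySem.List.pyRange_one_append 0 (a - 1) a (by omega) (by omega)
  rw [hsplit, List.filterMap_append]
  have h2 : PySem.List.pyRange (a - 1) a 1 = [a - 1] := by
    have := PySem.List.pyRange_one_singleton (a - 1)
    rwa [show a - 1 + 1 = a by ring] at this
  rw [h2]
  have h3 : (PySem.List.pyRange 0 (a - 1) 1).filterMap
      (fun b => if 2 ≤ a - b then some (a, b) else none)
      = (PySem.List.pyRange 0 (a - 1) 1).map (fun b => (a, b)) := by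
    rw [← List.filterMap_eq_map]
    apply List.filterMap_congr
    intro b hb
    have hb' := (PySem.List.mem_pyRange_one.1 hb)
    simp only [Function.comp]
    rw [if_pos (by omega)]
  rw [h3]
  have h4 : (if 2 ≤ a - (a - 1) then some (a, a - 1) else none) = none := by
    rw [if_neg (by omega)]
  simp

theorem pv_tiles_eq (n : Int) : pvATiles n = pvTilesL n := by
  unfold pvATiles pvTilesL
  rcases (by omega : n ≤ 2 ∨ 2 < n) with hn | hn
  · have h2 : PySem.List.pyRange 2 n 1 = [] := PySem.List.pyRange_one_eq_nil (by omega)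
    rw [h2]
    rcases (by omega : n ≤ 0 ∨ 0 < n) with h0 | h0
    · rw [PySem.List.pyRange_one_eq_nil (by omega)]; rfl
    · interval_cases n
      · decide
      · decide
  · rw [PySem.List.pyRange_one_append 0 2 n (by omega) (by omega), List.flatMap_append]
    have h01 : PySem.List.pyRange 0 2 1 = [0, 1] := by decide
    have hfst : ([0, 1] : List Int).flatMap
        (fun a => (PySem.List.pyRange 0 a 1).filterMap
          (fun b => if 2 ≤ a - b then some (a, b) else none)) = [] := by decide
    rw [h01, hfst, List.nil_append]
    apply List.flatMap_congr
    intro a ha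
    exact pv_inner_eq a (PySem.List.mem_pyRange_one.1 ha).1

theorem pv_tiles_pairwise (n : Int) :
    (pvTilesL n).Pairwise (fun x y : Int × Int => x.1 < y.1 ∨ (x.1 = y.1 ∧ x.2 < y.2)) := by
  unfold pvTilesL
  rw [List.pairwise_flatMap]
  constructor
  · intro a _
    rw [List.pairwise_map]
    exact (PySem.List.pairwise_lt_pyRange_one 0 (a-1)).imp (fun h => Or.inr ⟨rfl, h⟩)
  · apply (PySem.List.pairwise_lt_pyRange_one 2 n).imp
    intro a a' hlt x hx y hy
    rcases List.mem_map.1 hx with ⟨b, _, rfl⟩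
    rcases List.mem_map.1 hy with ⟨b', _, rfl⟩
    exact Or.inl hlt

theorem pv_sorted_tiles (n : Int) :
    PySem.List.sorted2 (pvATiles n) Prod.fst Prod.snd = pvATiles n := by
  unfold PySem.List.sorted2
  simp only [if_neg (by decide : ¬ (false = true))]
  rw [pv_foldl_insertBy_self _ (pvATiles n) [] ?_ (by simp)]
  · simp
  · rw [pv_tiles_eq]
    apply (pv_tiles_pairwise n).imp
    intro x y h
    rcases h with h | ⟨h1, h2⟩ <;> simp_all <;> omega

-- A's enumerate-fold over one a-group equals the double loop's inner loop with base = the offset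
theorem pv_inner_fold (bits m s : Int) :
    ∀ (c : Nat) (X : List (List Int)),
    (PySem.List.enumerate ((PySem.List.pyRange 0 (c : Int) 1).map (fun b => (m, b))) s).foldl
        (pvAStep bits) X
      = (PySem.List.pyRange 0 (c : Int) 1).foldl (pvBStep bits s m) X := by
  intro c
  induction c with
  | zero => intro X; simp [PySem.List.pyRange_one_eq_nil (le_refl 0)]
  | succ c ih =>
    intro X
    have hc : ((c + 1 : Nat) : Int) = (c : Int) + 1 := by push_cast; ring
    rw [hc, PySem.List.pyRange_one_succ_right (a:=0) (b:=(c:Int)) (by positivity), List.map_append,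
      PySem.List.enumerate_append, List.foldl_append, List.foldl_append, ih]
    simp only [List.map_cons, List.map_nil, PySem.List.enumerate_cons, PySem.List.enumerate_nil,
      List.foldl_cons, List.foldl_nil, List.length_map, PySem.List.length_pyRange_one]
    show pvAStep bits _ (s + ((c : Int) - 0).toNat, (m, (c : Int))) = pvBStep bits s m _ (c : Int)
    simp only [pvAStep, pvBStep]
    norm_num

theorem pv_main (bits : Int) :
    ∀ (k : Nat) (M : List (List Int)),
      ((PySem.List.enumerate (pvTilesL (2 + (k : Int)))).foldl (pvAStep bits) M
        = (PySem.List.pyRange 2 (2 + (k : Int)) 1).foldl (pvBOuter bits) M)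
      ∧ 2 * ((pvTilesL (2 + (k : Int))).length : Int) = ((k : Int) + 1) * (k : Int) := by
  intro k
  induction k with
  | zero =>
    intro M
    constructor
    · simp [pvTilesL, PySem.List.pyRange_one_eq_nil (by norm_num : (2:Int) ≤ 2)]
    · simp [pvTilesL, PySem.List.pyRange_one_eq_nil (by norm_num : (2:Int) ≤ 2)]
  | succ k ih =>
    intro M
    have hm : (2 + ((k + 1 : Nat) : Int)) = (2 + (k : Int)) + 1 := by push_cast; ring
    set m : Int := 2 + (k : Int) with hmdef
    have hrange : PySem.List.pyRange 2 (m + 1) 1 = PySem.List.pyRange 2 m 1 ++ [m] :=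
      PySem.List.pyRange_one_succ_right (a:=2) (b:=m) (by omega)
    have htiles : pvTilesL (m + 1)
        = pvTilesL m ++ (PySem.List.pyRange 0 (m - 1) 1).map (fun b => ((m : Int), b)) := by
      unfold pvTilesL
      rw [hrange, List.flatMap_append]
      simp
    have hlen : ((PySem.List.pyRange 0 (m - 1) 1).map (fun b => ((m : Int), b))).length
        = k + 1 := by
      rw [List.length_map, PySem.List.length_pyRange_one]; omega
    have hlen2 : 2 * ((pvTilesL (m + 1)).length : Int) = ((k : Int) + 2) * ((k : Int) + 1) := by
      rw [htiles]
      have := (ih M).2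
      simp only [List.length_append, hlen]
      push_cast at this ⊢
      nlinarith [this]
    constructor
    · rw [hm, htiles, PySem.List.enumerate_append, List.foldl_append, (ih M).1, hrange,
        List.foldl_append]
      set X := (PySem.List.pyRange 2 m 1).foldl (pvBOuter bits) M with hX
      have hbase : PySem.Int.floordiv ((m - 1) * (m - 2)) 2 = (0 : Int) + ((pvTilesL m).length : Int) := by
        have h2 := (ih M).2
        have hmm : (m - 1) * (m - 2) = 2 * ((pvTilesL m).length : Int) := by
          rw [h2]; push_cast; ring
        rw [hmm, PySem.Int.floordiv_eq_ediv_of_pos (by norm_num)]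
        omega
      simp only [List.foldl_cons, List.foldl_nil]
      rw [show pvBOuter bits X m
            = (PySem.List.pyRange 0 (m - 1) 1).foldl
                (pvBStep bits (PySem.Int.floordiv ((m - 1) * (m - 2)) 2) m) X from rfl,
        hbase]
      have hc : m - 1 = ((k + 1 : Nat) : Int) := by push_cast; omega
      rw [hc]
      exact pv_inner_fold bits m (0 + ((pvTilesL m).length : Int)) (k + 1) X
    · rw [hm, hlen2]; push_cast; ring

theorem pv_fold_eq (bits n : Int) (M : List (List Int)) :
    (PySem.List.enumerate (pvTilesL n)).foldl (pvAStep bits) M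
      = (PySem.List.pyRange 2 n 1).foldl (pvBOuter bits) M := by
  rcases (by omega : n ≤ 2 ∨ 2 < n) with hn | hn
  · have h1 : pvTilesL n = [] := by
      unfold pvTilesL; rw [PySem.List.pyRange_one_eq_nil (by omega)]; rfl
    rw [h1, PySem.List.pyRange_one_eq_nil (by omega)]
    simp [PySem.List.enumerate]
  · obtain ⟨k, hk⟩ : ∃ k : Nat, n = 2 + (k : Int) := ⟨(n - 2).toNat, by omega⟩
    subst hk
    exact (pv_main bits k M).1

-- ---- entrywise machinery: matrices as a function of (row, column) ----
def pvMk (n : Int) (f : Int → Int → Int) : List (List Int) :=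
  (PySem.List.pyRange 0 n 1).map (fun i => (PySem.List.pyRange 0 n 1).map (fun j => f i j))

theorem pv_mk_congr (n : Int) (f g : Int → Int → Int)
    (h : ∀ i j, 0 ≤ i → i < n → 0 ≤ j → j < n → f i j = g i j) :
    pvMk n f = pvMk n g := by
  unfold pvMk
  apply List.map_congr_left
  intro i hi
  have hi' := PySem.List.mem_pyRange_one.1 hi
  apply List.map_congr_left
  intro j hj
  have hj' := PySem.List.mem_pyRange_one.1 hj
  exact h i j hi'.1 hi'.2 hj'.1 hj'.2

theorem pv_mk_modify_set (n r c v : Int) (f : Int → Int → Int)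
    (hr : 0 ≤ r) (hrn : r < n) (hc : 0 ≤ c) (hcn : c < n) :
    (pvMk n f).modify r.toNat (fun row => row.set c.toNat v)
      = pvMk n (fun i j => if i = r ∧ j = c then v else f i j) := by
  apply List.ext_getElem
  · simp [pvMk]
  · intro t h1 h2
    have ht : t < (n - 0).toNat := by
      simpa [pvMk, PySem.List.length_pyRange_one] using h2
    simp only [List.getElem_modify]
    have hrow : ∀ g : Int → Int → Int, (pvMk n g)[t]'(by
        simpa [pvMk, PySem.List.length_pyRange_one] using ht)
        = (PySem.List.pyRange 0 n 1).map (fun j => g ((t : Int)) j) := by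
      intro g
      simp [pvMk, PySem.List.getElem_pyRange_one]
    rw [hrow, hrow]
    by_cases hteq : r.toNat = t
    · rw [if_pos hteq]
      have htr : (t : Int) = r := by omega
      apply List.ext_getElem
      · simp
      · intro u hu1 hu2
        have hu : u < (n - 0).toNat := by
          simpa [PySem.List.length_pyRange_one] using hu2
        simp only [List.getElem_set, List.getElem_map, PySem.List.getElem_pyRange_one]
        by_cases hueq : c.toNat = u
        · rw [if_pos hueq, if_pos (by constructor <;> omega)]
        · rw [if_neg hueq, if_neg (by
            rintro ⟨h1', h2'⟩; omega)]
    · rw [if_neg hteq]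
      apply List.map_congr_left
      intro j hj
      have hj' := PySem.List.mem_pyRange_one.1 hj
      rw [if_neg (by rintro ⟨h1', _⟩; omega)]

-- value lemmas for the per-cell function
theorem pv_cell_diag (bits i : Int) : pvCell bits i i = 0 := by simp [pvCell]

theorem pv_cell_sub (bits i j : Int) (h : j = i - 1) : pvCell bits i j = 1 := by
  subst h; unfold pvCell
  rw [if_neg (by omega), if_pos (by omega), if_pos (by omega)]

theorem pv_cell_sup (bits i j : Int) (h : i = j - 1) : pvCell bits i j = 0 := by
  subst h; unfold pvCell
  rw [if_neg (by omega), if_neg (by omega), if_pos (by omega)]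

theorem pv_cell_far_hi (bits m c : Int) (h : c ≤ m - 2) :
    pvCell bits m c
      = if PySem.Int.mod (bits >>> (PySem.Int.floordiv ((m - 1) * (m - 2)) 2 + c).toNat) 2 ≠ 0
          then 0 else 1 := by
  unfold pvCell
  rw [if_neg (by omega), if_pos (by omega), if_neg (by omega)]

theorem pv_cell_far_lo (bits m c : Int) (h : c ≤ m - 2) :
    pvCell bits c m
      = if PySem.Int.mod (bits >>> (PySem.Int.floordiv ((m - 1) * (m - 2)) 2 + c).toNat) 2 ≠ 0
          then 1 else 0 := by
  unfold pvCell
  rw [if_neg (by omega), if_neg (by omega), if_neg (by omega)]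

-- the subdiagonal-only entry function and the state after the first a-values of the tiles loop
def pvSubEnt (i j : Int) : Int := if j = i - 1 then 1 else 0

def pvEntF (bits m i j : Int) : Int :=
  if i < m ∧ j < m then pvCell bits i j else pvSubEnt i j

theorem pv_init_eq (n : Int) : pvAInit n = pvMk n (fun _ _ => 0) := by
  unfold pvAInit pvMk
  apply List.map_congr_left
  intro i _
  rw [List.map_const', PySem.List.length_pyRange_one]
  norm_num

theorem pv_sub_fold (n : Int) :
    ∀ (k : Nat), 1 + (k : Int) ≤ n →
      (PySem.List.pyRange 1 (1 + (k : Int)) 1).foldl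
          (fun A i => A.modify i.toNat (fun row => row.set (i - 1).toNat 1))
          (pvMk n (fun _ _ => 0))
        = pvMk n (fun i j => if j = i - 1 ∧ i < 1 + (k : Int) then 1 else 0) := by
  intro k
  induction k with
  | zero =>
    intro _
    rw [PySem.List.pyRange_one_eq_nil (by norm_num)]
    simp only [List.foldl_nil]
    apply pv_mk_congr
    intro i j hi0 hin hj0 hjn
    rw [if_neg (by rintro ⟨h1, h2⟩; omega)]
  | succ k ih =>
    intro hkn
    have hc : ((k + 1 : Nat) : Int) = (k : Int) + 1 := by push_cast; ring
    rw [hc, show (1 : Int) + ((k : Int) + 1) = (1 + (k : Int)) + 1 by ring,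
      PySem.List.pyRange_one_succ_right (a:=1) (b:=1 + (k : Int)) (by omega),
      List.foldl_append, ih (by push_cast at hkn ⊢; omega)]
    simp only [List.foldl_cons, List.foldl_nil]
    rw [pv_mk_modify_set n (1 + (k : Int)) (1 + (k : Int) - 1) 1 _ (by omega)
      (by push_cast at hkn; omega) (by omega) (by push_cast at hkn; omega)]
    apply pv_mk_congr
    intro i j hi0 hin hj0 hjn
    split_ifs <;> omega

theorem pv_asub_eq (n : Int) : pvASub n (pvAInit n) = pvMk n pvSubEnt := by
  unfold pvASub
  rw [pv_init_eq]
  rcases (by omega : n ≤ 1 ∨ 1 ≤ n) with hn | hn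
  · rw [PySem.List.pyRange_one_eq_nil (by omega)]
    simp only [List.foldl_nil]
    apply pv_mk_congr
    intro i j hi0 hin hj0 hjn
    unfold pvSubEnt
    rw [if_neg (by omega)]
  · have hk : PySem.List.pyRange 1 n 1 = PySem.List.pyRange 1 (1 + ((n - 1).toNat : Int)) 1 := by
      rw [show (1 : Int) + ((n - 1).toNat : Int) = n by omega]
    rw [hk, pv_sub_fold n (n - 1).toNat (by omega)]
    apply pv_mk_congr
    intro i j hi0 hin hj0 hjn
    unfold pvSubEnt
    split_ifs <;> omega

-- inner loop of the double loop, entrywise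
theorem pv_inner_ent (bits n m : Int) (h2 : 2 ≤ m) (hmn : m < n) :
    ∀ (c : Nat), (c : Int) ≤ m - 1 →
      (PySem.List.pyRange 0 (c : Int) 1).foldl
          (pvBStep bits (PySem.Int.floordiv ((m - 1) * (m - 2)) 2) m)
          (pvMk n (pvEntF bits m))
        = pvMk n (fun i j =>
            if (i = m ∧ 0 ≤ j ∧ j < (c : Int)) ∨ (j = m ∧ 0 ≤ i ∧ i < (c : Int))
              then pvCell bits i j else pvEntF bits m i j) := by
  intro c
  induction c with
  | zero =>
    intro _
    rw [PySem.List.pyRange_one_eq_nil (by norm_num)]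
    simp only [List.foldl_nil]
    apply pv_mk_congr
    intro i j hi0 hin hj0 hjn
    rw [if_neg (by rintro (⟨_, _, h⟩ | ⟨_, _, h⟩) <;> omega)]
  | succ c ih =>
    intro hcm
    have hcast : ((c + 1 : Nat) : Int) = (c : Int) + 1 := by push_cast; ring
    have hcm' : (c : Int) ≤ m - 1 := by push_cast at hcm; omega
    have hcm2 : (c : Int) ≤ m - 2 := by push_cast at hcm; omega
    rw [hcast, PySem.List.pyRange_one_succ_right (a:=0) (b:=(c : Int)) (by positivity),
      List.foldl_append, ih hcm']
    simp only [List.foldl_cons, List.foldl_nil]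
    unfold pvBStep
    by_cases hbit : PySem.Int.mod
        (bits >>> (PySem.Int.floordiv ((m - 1) * (m - 2)) 2 + (c : Int)).toNat) 2 ≠ 0
    · rw [if_pos hbit,
        pv_mk_modify_set n (c : Int) m 1 _ (by positivity) (by omega) (by omega) hmn]
      apply pv_mk_congr
      intro i j hi0 hin hj0 hjn
      by_cases hw : i = (c : Int) ∧ j = m
      · rw [if_pos hw, if_pos (Or.inr ⟨hw.2, hi0, by omega⟩)]
        rw [hw.1, hw.2, pv_cell_far_lo bits m (c : Int) hcm2, if_pos hbit]
      · rw [if_neg hw]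
        by_cases hnew : (i = m ∧ 0 ≤ j ∧ j < (c : Int) + 1) ∨ (j = m ∧ 0 ≤ i ∧ i < (c : Int) + 1)
        · rw [if_pos hnew]
          rcases hnew with ⟨hi, hj0', hjc⟩ | ⟨hj, hi0', hic⟩
          · by_cases hjc' : j < (c : Int)
            · rw [if_pos (Or.inl ⟨hi, hj0', hjc'⟩)]
            · -- j = c : the cell (m, c) keeps its old value, equal to pvCell when the bit is set
              have hjc'' : j = (c : Int) := by omega
              rw [if_neg (by rintro (⟨_, _, h⟩ | ⟨h, _, _⟩) <;> omega)]
              rw [hi, hjc'', pv_cell_far_hi bits m (c : Int) hcm2, if_pos hbit]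
              unfold pvEntF pvSubEnt
              rw [if_neg (by omega), if_neg (by omega)]
          · have hic' : i < (c : Int) := by
              rcases (by omega : i < (c : Int) ∨ i = (c : Int)) with h | h
              · exact h
              · exact absurd ⟨h, hj⟩ hw
            rw [if_pos (Or.inr ⟨hj, hi0', hic'⟩)]
        · rw [if_neg hnew, if_neg (fun h => hnew (by
            rcases h with ⟨h1, h2, h3⟩ | ⟨h1, h2, h3⟩
            exacts [Or.inl ⟨h1, h2, by omega⟩, Or.inr ⟨h1, h2, by omega⟩]))]
    · rw [if_neg hbit,
        pv_mk_modify_set n m (c : Int) 1 _ (by omega) hmn (by positivity) (by omega)]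
      apply pv_mk_congr
      intro i j hi0 hin hj0 hjn
      by_cases hw : i = m ∧ j = (c : Int)
      · rw [if_pos hw, if_pos (Or.inl ⟨hw.1, hj0, by omega⟩)]
        rw [hw.1, hw.2, pv_cell_far_hi bits m (c : Int) hcm2, if_neg hbit]
      · rw [if_neg hw]
        by_cases hnew : (i = m ∧ 0 ≤ j ∧ j < (c : Int) + 1) ∨ (j = m ∧ 0 ≤ i ∧ i < (c : Int) + 1)
        · rw [if_pos hnew]
          rcases hnew with ⟨hi, hj0', hjc⟩ | ⟨hj, hi0', hic⟩
          · have hjc' : j < (c : Int) := by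
              rcases (by omega : j < (c : Int) ∨ j = (c : Int)) with h | h
              · exact h
              · exact absurd ⟨hi, h⟩ hw
            rw [if_pos (Or.inl ⟨hi, hj0', hjc'⟩)]
          · by_cases hic' : i < (c : Int)
            · rw [if_pos (Or.inr ⟨hj, hi0', hic'⟩)]
            · have hic'' : i = (c : Int) := by omega
              rw [if_neg (by rintro (⟨h, _, _⟩ | ⟨_, _, h⟩) <;> omega)]
              rw [hic'', hj, pv_cell_far_lo bits m (c : Int) hcm2, if_neg hbit]
              unfold pvEntF pvSubEnt
              rw [if_neg (by omega), if_neg (by omega)]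
        · rw [if_neg hnew, if_neg (fun h => hnew (by
            rcases h with ⟨h1, h2, h3⟩ | ⟨h1, h2, h3⟩
            exacts [Or.inl ⟨h1, h2, by omega⟩, Or.inr ⟨h1, h2, by omega⟩]))]

-- one outer iteration advances the entry function from m to m + 1
theorem pv_outer_step (bits n m : Int) (h2 : 2 ≤ m) (hmn : m < n) :
    pvBOuter bits (pvMk n (pvEntF bits m)) m = pvMk n (pvEntF bits (m + 1)) := by
  show (PySem.List.pyRange 0 (m - 1) 1).foldl
      (pvBStep bits (PySem.Int.floordiv ((m - 1) * (m - 2)) 2) m)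
      (pvMk n (pvEntF bits m)) = _
  have hk : PySem.List.pyRange 0 (m - 1) 1
      = PySem.List.pyRange 0 (((m - 1).toNat : Nat) : Int) 1 := by
    rw [show (((m - 1).toNat : Nat) : Int) = m - 1 by omega]
  rw [hk, pv_inner_ent bits n m h2 hmn (m - 1).toNat (by omega)]
  apply pv_mk_congr
  intro i j hi0 hin hj0 hjn
  have hcint : (((m - 1).toNat : Nat) : Int) = m - 1 := by omega
  rw [hcint]
  unfold pvEntF
  by_cases hlead : (i = m ∧ 0 ≤ j ∧ j < m - 1) ∨ (j = m ∧ 0 ≤ i ∧ i < m - 1)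
  · rw [if_pos hlead, if_pos (by rcases hlead with ⟨h, _⟩ | ⟨h, _⟩ <;> omega)]
  · rw [if_neg hlead]
    by_cases hm : i < m ∧ j < m
    · rw [if_pos hm, if_pos (by omega)]
    · rw [if_neg hm]
      by_cases hm1 : i < m + 1 ∧ j < m + 1
      · rw [if_pos hm1]
        -- the remaining new cells: (m, m-1), (m-1, m), (m, m) — near-diagonal values agree
        unfold pvSubEnt
        rcases (by omega : (i = m ∧ j = m - 1) ∨ (i = m - 1 ∧ j = m) ∨ (i = m ∧ j = m)) with
          ⟨hi, hj⟩ | ⟨hi, hj⟩ | ⟨hi, hj⟩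
        · rw [hi, hj, pv_cell_sub bits m (m - 1) rfl, if_pos (by omega)]
        · rw [hi, hj, pv_cell_sup bits (m - 1) m rfl, if_neg (by omega)]
        · rw [hi, hj, pv_cell_diag, if_neg (by omega)]
      · rw [if_neg hm1]

theorem pv_outer_fold (bits n : Int) :
    ∀ (k : Nat), 2 + (k : Int) ≤ n →
      (PySem.List.pyRange 2 (2 + (k : Int)) 1).foldl (pvBOuter bits) (pvMk n pvSubEnt)
        = pvMk n (pvEntF bits (2 + (k : Int))) := by
  intro k
  induction k with
  | zero =>
    intro _
    rw [show (2 : Int) + ((0 : Nat) : Int) = 2 by norm_num,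
      PySem.List.pyRange_one_eq_nil (by norm_num)]
    simp only [List.foldl_nil]
    apply pv_mk_congr
    intro i j hi0 hin hj0 hjn
    unfold pvEntF pvSubEnt
    by_cases hm : i < 2 ∧ j < 2
    · rw [if_pos hm]
      rcases (by omega : (i = 0 ∧ j = 0) ∨ (i = 0 ∧ j = 1) ∨ (i = 1 ∧ j = 0) ∨ (i = 1 ∧ j = 1))
        with ⟨hi, hj⟩ | ⟨hi, hj⟩ | ⟨hi, hj⟩ | ⟨hi, hj⟩ <;> subst hi <;> subst hj
      · rw [pv_cell_diag, if_neg (by omega)]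
      · rw [pv_cell_sup bits 0 1 (by norm_num), if_neg (by omega)]
      · rw [pv_cell_sub bits 1 0 (by norm_num), if_pos (by norm_num)]
      · rw [pv_cell_diag, if_neg (by omega)]
    · rw [if_neg hm]
  | succ k ih =>
    intro hkn
    have hcast : (2 : Int) + ((k + 1 : Nat) : Int) = (2 + (k : Int)) + 1 := by push_cast; ring
    rw [hcast, PySem.List.pyRange_one_succ_right (a:=2) (b:=2 + (k : Int)) (by omega),
      List.foldl_append, ih (by push_cast at hkn ⊢; omega)]
    simp only [List.foldl_cons, List.foldl_nil]
    exact pv_outer_step bits n (2 + (k : Int)) (by omega) (by push_cast at hkn; omega)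

-- ===== VERDICT (by name: the statement is the Claim_ definition above) =====
theorem tiling_to_tournament_spec : Claim_equal_tiling_to_tournament := by
  intro bits n _
  show tiling_to_tournament bits n = tiling_to_tournament_alt bits n
  unfold tiling_to_tournament
  rw [pv_sorted_tiles, pv_tiles_eq, pv_fold_eq, pv_asub_eq]
  have halt : tiling_to_tournament_alt bits n = pvMk n (fun i j => pvCell bits i j) := rfl
  rw [halt]
  rcases (by omega : n ≤ 2 ∨ 2 ≤ n) with hn | hn
  · rw [PySem.List.pyRange_one_eq_nil (by omega)]
    simp only [List.foldl_nil]
    apply pv_mk_congr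
    intro i j hi0 hin hj0 hjn
    unfold pvSubEnt
    rcases (by omega : (i = 0 ∧ j = 0) ∨ (i = 0 ∧ j = 1) ∨ (i = 1 ∧ j = 0) ∨ (i = 1 ∧ j = 1))
      with ⟨hi, hj⟩ | ⟨hi, hj⟩ | ⟨hi, hj⟩ | ⟨hi, hj⟩ <;> subst hi <;> subst hj
    · rw [pv_cell_diag, if_neg (by omega)]
    · rw [pv_cell_sup bits 0 1 (by norm_num), if_neg (by omega)]
    · rw [pv_cell_sub bits 1 0 (by norm_num), if_pos (by norm_num)]
    · rw [pv_cell_diag, if_neg (by omega)]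
  · have hk : PySem.List.pyRange 2 n 1 = PySem.List.pyRange 2 (2 + ((n - 2).toNat : Int)) 1 := by
      rw [show (2 : Int) + ((n - 2).toNat : Int) = n by omega]
    rw [hk, pv_outer_fold bits n (n - 2).toNat (by omega)]
    apply pv_mk_congr
    intro i j hi0 hin hj0 hjn
    unfold pvEntF
    rw [if_pos (by omega)]
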